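-- pv_equiv track=rewrite | github.com/OskarJakubanis/Crypto-spot-futures-comparison | crypto_compare2.py | filter_symbols
-- ===== SOURCE A (Python) =====
-- def filter_symbols(binance_spot, binance_futures, bybit_spot, bybit_futures):
--     # We want only symbols with USDT or USDC suffix existing in both spot and futures
--     bnc_spot_syms = {item['symbol'] for item in binance_spot if item['symbol'].endswith(('USDT', 'USDC'))}
--     bnc_fut_syms = {item['symbol'] for item in binance_futures if item['symbol'].endswith(('USDT', 'USDC'))}
--     bbt_spot_syms = {item['symbol'] for item in bybit_spot if item['symbol'].endswith(('USDT', 'USDC'))}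
--     bbt_fut_syms = {item['symbol'] for item in bybit_futures if item['symbol'].endswith(('USDT', 'USDC'))}
--
--     bnc_common = bnc_spot_syms.intersection(bnc_fut_syms)
--     bbt_common = bbt_spot_syms.intersection(bbt_fut_syms)
--     common_symbols = bnc_common.intersection(bbt_common)
--     return common_symbols
-- ===== SOURCE B (Python) =====
-- def filter_symbols(binance_spot, binance_futures, bybit_spot, bybit_futures):
--     # Count, per symbol, how many of the four (deduplicated) exchange feeds
--     # list it; the symbols common to all feeds are exactly those counted 4 times.
--     counts = {}
--     for data in (binance_spot, binance_futures, bybit_spot, bybit_futures):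
--         for sym in {item['symbol'] for item in data if item['symbol'].endswith(('USDT', 'USDC'))}:
--             counts[sym] = counts.get(sym, 0) + 1
--     return {s for s, c in counts.items() if c == 4}
-- ===== Notes on version B (the rewrite author's own statement) =====
-- stated objective: alternative
-- what changed: Replaces the chain of pairwise set intersections with a single counting pass: one dict tallies in how many of the four per-exchange symbol sets each symbol occurs, and the result is the symbols counted four times.
import Mathlib
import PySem

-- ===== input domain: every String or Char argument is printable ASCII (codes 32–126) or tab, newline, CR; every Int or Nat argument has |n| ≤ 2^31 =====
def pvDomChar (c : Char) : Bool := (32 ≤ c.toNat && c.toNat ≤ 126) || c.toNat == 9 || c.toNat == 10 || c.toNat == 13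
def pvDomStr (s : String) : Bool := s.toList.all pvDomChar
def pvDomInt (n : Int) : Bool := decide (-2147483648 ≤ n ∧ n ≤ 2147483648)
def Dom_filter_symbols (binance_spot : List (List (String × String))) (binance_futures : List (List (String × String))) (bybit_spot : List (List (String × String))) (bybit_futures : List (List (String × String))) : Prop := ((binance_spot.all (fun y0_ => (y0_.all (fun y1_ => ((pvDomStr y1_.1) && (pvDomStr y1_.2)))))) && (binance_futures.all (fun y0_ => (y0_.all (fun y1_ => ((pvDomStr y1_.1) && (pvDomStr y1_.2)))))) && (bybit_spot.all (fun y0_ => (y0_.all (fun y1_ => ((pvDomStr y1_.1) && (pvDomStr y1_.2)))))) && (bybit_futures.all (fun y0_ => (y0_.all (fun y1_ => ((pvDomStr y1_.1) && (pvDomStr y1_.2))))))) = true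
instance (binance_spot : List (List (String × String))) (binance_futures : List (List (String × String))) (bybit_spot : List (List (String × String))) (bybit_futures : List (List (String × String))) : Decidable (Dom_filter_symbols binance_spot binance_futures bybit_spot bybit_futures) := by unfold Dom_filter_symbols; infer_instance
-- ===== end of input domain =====

-- B replaces A's chain of pairwise set intersections with one counting pass over the
-- four per-exchange symbol sets, keeping the symbols counted four times (objective: alternative).

-- ===== PORT A =====
-- shared helper: the set comprehension {item['symbol'] for item in data if item['symbol'].endswith(('USDT','USDC'))}
-- (both Pythons contain this comprehension verbatim); item['symbol'] is exact under Pre_ (key present)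
def pvSyms (data : List (List (String × String))) : PySem.Set String :=
  PySem.Set.ofList (data.filterMap (fun item =>
    let s := ((PySem.Dict.mk item).get? "symbol").getD ""
    if PySem.Str.endswith s "USDT" || PySem.Str.endswith s "USDC" then some s else none))

def filter_symbols (binance_spot : List (List (String × String))) (binance_futures : List (List (String × String))) (bybit_spot : List (List (String × String))) (bybit_futures : List (List (String × String))) : List String :=
  let bnc_spot_syms := pvSyms binance_spot
  let bnc_fut_syms := pvSyms binance_futures
  let bbt_spot_syms := pvSyms bybit_spot
  let bbt_fut_syms := pvSyms bybit_futures
  let bnc_common := PySem.Set.inter bnc_spot_syms bnc_fut_syms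
  let bbt_common := PySem.Set.inter bbt_spot_syms bbt_fut_syms
  PySem.Set.inter bnc_common bbt_common

-- ===== PORT B =====
def filter_symbols_alt (binance_spot : List (List (String × String))) (binance_futures : List (List (String × String))) (bybit_spot : List (List (String × String))) (bybit_futures : List (List (String × String))) : List String :=
  let counts : PySem.Dict String Int :=
    [binance_spot, binance_futures, bybit_spot, bybit_futures].foldl
      (fun counts data =>
        (pvSyms data).foldl (fun counts sym => counts.insert sym (counts.getD sym 0 + 1)) counts)
      PySem.Dict.empty
  PySem.Set.ofList ((counts.items.filter (fun p => p.2 == (4 : Int))).map (fun p => p.1))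

-- ===== PRECONDITION & SPEC =====
-- Pre_ excludes exactly the inputs where some item lacks the key 'symbol': there Python A raises KeyError.
def Pre_filter_symbols (binance_spot : List (List (String × String))) (binance_futures : List (List (String × String))) (bybit_spot : List (List (String × String))) (bybit_futures : List (List (String × String))) : Prop :=
  ([binance_spot, binance_futures, bybit_spot, bybit_futures].all
    (fun l => l.all (fun item => (PySem.Dict.mk item).contains "symbol"))) = true
instance (binance_spot : List (List (String × String))) (binance_futures : List (List (String × String))) (bybit_spot : List (List (String × String))) (bybit_futures : List (List (String × String))) : Decidable (Pre_filter_symbols binance_spot binance_futures bybit_spot bybit_futures) := by unfold Pre_filter_symbols; infer_instance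

def pvWitness_filter_symbols : (List (List (String × String))) × (List (List (String × String))) × (List (List (String × String))) × (List (List (String × String))) :=
  ([[("symbol", "BTCUSDT")], [("symbol", "ETHUSDC")]], [[("symbol", "BTCUSDT")]], [[("symbol", "BTCUSDT")]], [[("symbol", "BTCUSDT")], [("symbol", "XRP")]])

def Spec_filter_symbols (binance_spot : List (List (String × String))) (binance_futures : List (List (String × String))) (bybit_spot : List (List (String × String))) (bybit_futures : List (List (String × String))) (out : List String) : Prop := out = filter_symbols_alt binance_spot binance_futures bybit_spot bybit_futures
instance (binance_spot : List (List (String × String))) (binance_futures : List (List (String × String))) (bybit_spot : List (List (String × String))) (bybit_futures : List (List (String × String))) (out : List String) : Decidable (Spec_filter_symbols binance_spot binance_futures bybit_spot bybit_futures out) := by unfold Spec_filter_symbols; infer_instance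

-- ===== CLAIM (what is proved, stated in full; the proofs are below) =====
def Claim_equal_filter_symbols : Prop := ∀ (binance_spot : List (List (String × String))) (binance_futures : List (List (String × String))) (bybit_spot : List (List (String × String))) (bybit_futures : List (List (String × String))), Dom_filter_symbols binance_spot binance_futures bybit_spot bybit_futures → Pre_filter_symbols binance_spot binance_futures bybit_spot bybit_futures → Spec_filter_symbols binance_spot binance_futures bybit_spot bybit_futures (filter_symbols binance_spot binance_futures bybit_spot bybit_futures)

-- ===== LEMMAS AND PROOFS =====

theorem pv_count_nodup {x : String} {s : List String} (h : s.Nodup) :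
    s.count x = if x ∈ s then 1 else 0 := by
  split
  · exact List.count_eq_one_of_mem h ‹_›
  · exact List.count_eq_zero.mpr ‹_›

theorem pv_inter_eq_count4 (s1 s2 s3 s4 : List String)
    (h1 : s1.Nodup) (h2 : s2.Nodup) (h3 : s3.Nodup) (h4 : s4.Nodup) :
    PySem.Set.inter (PySem.Set.inter s1 s2) (PySem.Set.inter s3 s4)
      = PySem.Set.ofList (((PySem.Dict.counter (s1 ++ s2 ++ s3 ++ s4)).items.filter
          (fun p => p.2 == (4 : Int))).map (fun p => p.1)) := by
  rw [PySem.Dict.items_counter]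
  rw [List.filter_map, List.map_map]
  have hcomp : (fun p : String × Int => p.1) ∘ (fun k => (k, ((s1 ++ s2 ++ s3 ++ s4).count k : Int))) = id := rfl
  rw [hcomp, List.map_id]
  have hq : ∀ x : String, (((fun p : String × Int => p.2 == (4:Int)) ∘ (fun k => (k, ((s1 ++ s2 ++ s3 ++ s4).count k : Int)))) x) = (((s1 ++ s2 ++ s3 ++ s4).count x == 4) : Bool) := by
    intro x; simp [Function.comp]
    omega
  rw [List.filter_congr (fun x _ => hq x)]
  rw [show s1 ++ s2 ++ s3 ++ s4 = s1 ++ (s2 ++ (s3 ++ s4)) from by simp]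
  rw [PySem.Set.ofList_append, PySem.Set.ofList_eq_self_of_nodup s1 h1,
      PySem.Set.update_eq_append_filter, List.filter_append]
  have hcnt : ∀ x : String, (s1 ++ (s2 ++ (s3 ++ s4))).count x
      = s1.count x + s2.count x + s3.count x + s4.count x := by
    intro x; simp [List.count_append]; omega
  have htail : List.filter (fun x => (s1 ++ (s2 ++ (s3 ++ s4))).count x == 4)
      (List.filter (fun y => !PySem.Set.contains s1 y) (PySem.Set.ofList (s2 ++ (s3 ++ s4)))) = [] := by
    rw [List.filter_eq_nil_iff]
    intro x hx
    have hx1 : x ∉ s1 := by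
      have := (List.mem_filter.mp hx).2
      simpa [PySem.Set.contains_iff] using this
    have : (s1 ++ (s2 ++ (s3 ++ s4))).count x ≤ 3 := by
      rw [hcnt]
      have c1 : s1.count x = 0 := List.count_eq_zero.mpr hx1
      have c2 := pv_count_nodup (x := x) h2
      have c3 := pv_count_nodup (x := x) h3
      have c4 := pv_count_nodup (x := x) h4
      split_ifs at c2 c3 c4 <;> omega
    rw [hcnt] at this
    simp only [beq_iff_eq, ne_eq, hcnt]
    omega
  rw [htail, List.append_nil]
  rw [PySem.Set.ofList_eq_self_of_nodup _ (h1.filter _)]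
  show List.filter _ (List.filter _ s1) = _
  rw [List.filter_filter]
  apply List.filter_congr
  intro x hx1
  have c1 : s1.count x = 1 := List.count_eq_one_of_mem h1 hx1
  have c2 := pv_count_nodup (x := x) h2
  have c3 := pv_count_nodup (x := x) h3
  have c4 := pv_count_nodup (x := x) h4
  simp [PySem.Set.inter, List.mem_filter, hcnt]
  by_cases m2 : x ∈ s2 <;> by_cases m3 : x ∈ s3 <;> by_cases m4 : x ∈ s4 <;>
    simp [m2, m3, m4] at c2 c3 c4 ⊢ <;> omega

theorem pv_fold_eq_counter (s1 s2 s3 s4 : List String) :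
    List.foldl (fun d x => d.insert x (d.getD x 0 + 1))
      (List.foldl (fun d x => d.insert x (d.getD x 0 + 1))
        (List.foldl (fun d x => d.insert x (d.getD x 0 + 1))
          (List.foldl (fun d x => d.insert x (d.getD x 0 + 1)) PySem.Dict.empty s1) s2) s3) s4
      = PySem.Dict.counter (s1 ++ s2 ++ s3 ++ s4) := by
  rw [← PySem.Dict.foldl_insert_getD_add_one_eq_counter]
  simp [List.foldl_append]

-- ===== VERDICT (by name: the statement is the Claim_ definition above) =====
theorem filter_symbols_spec : Claim_equal_filter_symbols := by
  intro a1 a2 a3 a4 _ _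
  unfold Spec_filter_symbols filter_symbols filter_symbols_alt
  simp only [List.foldl_cons, List.foldl_nil]
  rw [pv_fold_eq_counter]
  exact pv_inter_eq_count4 _ _ _ _ (PySem.Set.nodup_ofList _) (PySem.Set.nodup_ofList _)
    (PySem.Set.nodup_ofList _) (PySem.Set.nodup_ofList _)
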